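-- pv_equiv track=rewrite | github.com/lebergarrett/python-rl-ratings | main.py | find_lowest_rank
-- ===== SOURCE A (Python) =====
-- def find_lowest_rank(account_map):
--     lowest_rank_map = {}  # {'1v1': MrKump, '2v2': MrKumpy, etc}
--
--     for account in account_map:
--         for playlist in account_map[account]:
--             # Base case, all playlists will be listed
--             if playlist not in lowest_rank_map:
--                 lowest_rank_map[playlist] = account
--
--             # Pull data to run comparisons against
--             compare_account = lowest_rank_map[playlist]
--             compare_rating = account_map[compare_account][playlist]
--
--             # Compare the ratings, if lower, replace value in map
--             rating = account_map[account][playlist]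
--             if rating < compare_rating:
--                 lowest_rank_map[playlist] = account
--
--     return lowest_rank_map
-- ===== SOURCE B (Python) =====
-- def find_lowest_rank(account_map):
--     # Group-then-reduce: invert the map into playlist -> [(account, rating)] in
--     # encounter order, then pick the first account with the minimal rating.
--     by_playlist = {}
--     for account, playlists in account_map.items():
--         for playlist, rating in playlists.items():
--             by_playlist.setdefault(playlist, []).append((account, rating))
--     return {playlist: min(entries, key=lambda e: e[1])[0]
--             for playlist, entries in by_playlist.items()}
-- ===== Notes on version B (the rewrite author's own statement) =====
-- stated objective: alternative
-- what changed: A interleaves a running minimum with repeated dict re-lookups of the current best account's rating; B first inverts the map into playlist -> [(account, rating)] in encounter order and then, in a separate pass, picks the first account with the minimal rating per playlist.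
import Mathlib
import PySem

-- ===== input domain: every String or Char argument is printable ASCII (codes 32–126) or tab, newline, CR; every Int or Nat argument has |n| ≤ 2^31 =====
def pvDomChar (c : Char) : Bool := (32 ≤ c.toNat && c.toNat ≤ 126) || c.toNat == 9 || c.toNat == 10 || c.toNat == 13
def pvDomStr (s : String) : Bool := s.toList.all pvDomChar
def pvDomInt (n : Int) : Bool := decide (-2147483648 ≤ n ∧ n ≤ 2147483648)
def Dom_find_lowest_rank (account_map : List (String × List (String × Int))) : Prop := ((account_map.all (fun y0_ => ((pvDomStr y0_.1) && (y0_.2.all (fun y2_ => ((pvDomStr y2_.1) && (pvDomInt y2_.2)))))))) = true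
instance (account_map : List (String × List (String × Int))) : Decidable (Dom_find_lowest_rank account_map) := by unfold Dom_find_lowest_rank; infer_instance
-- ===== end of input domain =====

-- B replaces A's interleaved running-minimum-with-dict-relookup by a group-then-reduce
-- decomposition (invert into playlist -> [(account, rating)], then first-minimal per playlist);
-- objective: alternative structure, same observable result.

-- ===== PORT A =====
def find_lowest_rank (account_map : List (String × List (String × Int))) : List (String × String) :=
  (account_map.foldl (fun lrm ap =>
    ap.2.foldl (fun lrm pr =>
      -- if playlist not in lowest_rank_map: lowest_rank_map[playlist] = account
      let lrm := if lrm.contains pr.1 then lrm else lrm.insert pr.1 ap.1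
      let compare_account := lrm.getD pr.1 ""
      let compare_rating :=
        (PySem.Dict.mk ((PySem.Dict.mk account_map).getD compare_account [])).getD pr.1 0
      let rating := (PySem.Dict.mk ((PySem.Dict.mk account_map).getD ap.1 [])).getD pr.1 0
      if rating < compare_rating then lrm.insert pr.1 ap.1 else lrm) lrm)
    PySem.Dict.empty).items

-- ===== PORT B =====
def find_lowest_rank_alt (account_map : List (String × List (String × Int))) : List (String × String) :=
  let by_playlist : PySem.Dict String (List (String × Int)) :=
    account_map.foldl (fun idx ap =>
      ap.2.foldl (fun idx pr =>
        idx.modify pr.1 [] (fun e => e ++ [(ap.1, pr.2)])) idx) PySem.Dict.empty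
  -- entries lists are nonempty by construction, so '.getD ""' never supplies its default
  by_playlist.items.map (fun pe =>
    (pe.1, ((PySem.List.min? pe.2 (fun q => q.2)).map (fun q => q.1)).getD ""))

-- ===== PRECONDITION & SPEC =====
-- Pre_ excludes association lists with a duplicate account key, or a duplicate playlist key
-- inside one account: such duplicates cannot occur in A's Python dict input (the dict literal
-- already collapses them), and on the raw list A's first-match re-lookup by account name would
-- read an entry other than the one being iterated, making the value accidental.
def Pre_find_lowest_rank (account_map : List (String × List (String × Int))) : Prop :=
  (account_map.map Prod.fst).Nodup ∧ ∀ ap ∈ account_map, (ap.2.map Prod.fst).Nodup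
instance (account_map : List (String × List (String × Int))) : Decidable (Pre_find_lowest_rank account_map) := by unfold Pre_find_lowest_rank; infer_instance
def pvWitness_find_lowest_rank : (List (String × List (String × Int))) :=
  [("kump", [("1v1", 3), ("2v2", 5)]), ("ava", [("1v1", 2)])]
def Spec_find_lowest_rank (account_map : List (String × List (String × Int))) (out : List (String × String)) : Prop := out = find_lowest_rank_alt account_map
instance (account_map : List (String × List (String × Int))) (out : List (String × String)) : Decidable (Spec_find_lowest_rank account_map out) := by unfold Spec_find_lowest_rank; infer_instance

-- ===== CLAIM (what is proved, stated in full; the proofs are below) =====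
def Claim_equal_find_lowest_rank : Prop := ∀ (account_map : List (String × List (String × Int))), Dom_find_lowest_rank account_map → Pre_find_lowest_rank account_map → Spec_find_lowest_rank account_map (find_lowest_rank account_map)

-- ===== LEMMAS AND PROOFS =====

-- A's rating lookup expression: account_map[a][p] with defaults
def pvLook (am : List (String × List (String × Int))) (a p : String) : Int :=
  (PySem.Dict.mk ((PySem.Dict.mk am).getD a [])).getD p 0

-- first account achieving the minimal rating (B's reduce)
def pvMf (e : List (String × Int)) : String :=
  ((PySem.List.min? e (fun q => q.2)).map (fun q => q.1)).getD ""

-- the two loop bodies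
def pvStepA (am : List (String × List (String × Int))) (a : String)
    (lrm : PySem.Dict String String) (pr : String × Int) : PySem.Dict String String :=
  let lrm := if lrm.contains pr.1 then lrm else lrm.insert pr.1 a
  let compare_account := lrm.getD pr.1 ""
  let compare_rating := pvLook am compare_account pr.1
  let rating := pvLook am a pr.1
  if rating < compare_rating then lrm.insert pr.1 a else lrm

def pvStepB (a : String) (idx : PySem.Dict String (List (String × Int)))
    (pr : String × Int) : PySem.Dict String (List (String × Int)) :=
  idx.modify pr.1 [] (fun e => e ++ [(a, pr.2)])

-- invariant linking A's state to B's state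
def pvInv (am : List (String × List (String × Int)))
    (lrm : PySem.Dict String String) (idx : PySem.Dict String (List (String × Int))) : Prop :=
  lrm.items = idx.items.map (fun pe => (pe.1, pvMf pe.2)) ∧
  (∀ pe ∈ idx.items, pe.2 ≠ [] ∧ ∀ q ∈ pe.2, pvLook am q.1 pe.1 = q.2) ∧
  idx.keys.Nodup

theorem pv_min?_append (e : List (String × Int)) (x : String × Int) :
    PySem.List.min? (e ++ [x]) (fun q => q.2) =
      match PySem.List.min? e (fun q => q.2) with
      | none => some x
      | some m => if x.2 < m.2 then some x else some m := by
  simp [PySem.List.min?, List.foldl_append]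
  cases List.foldl _ none e <;> rfl



theorem pv_inv_step (am : List (String × List (String × Int)))
    (a : String) (lrm : PySem.Dict String String)
    (idx : PySem.Dict String (List (String × Int))) (pr : String × Int)
    (hL : pvLook am a pr.1 = pr.2) (h : pvInv am lrm idx) :
    pvInv am (pvStepA am a lrm pr) (pvStepB a idx pr) := by
  obtain ⟨h1, h2, h3⟩ := h
  obtain ⟨p, r⟩ := pr
  simp only at hL
  have hcc : lrm.contains p = idx.contains p := by
    simp [PySem.Dict.contains, h1, List.any_map, Function.comp_def]
  by_cases hc : idx.contains p = true
  · -- existing playlist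
    obtain ⟨e, he⟩ : ∃ e, idx.get? p = some e := by
      rw [PySem.Dict.contains_eq_isSome_get?] at hc
      exact Option.isSome_iff_exists.mp hc
    have hmem : (p, e) ∈ idx.items := PySem.Dict.mem_items_of_get?_eq_some _ he
    obtain ⟨hne, hLe⟩ := h2 (p, e) hmem
    obtain ⟨m, hm⟩ : ∃ m, PySem.List.min? e (fun q => q.2) = some m := by
      cases hmin : PySem.List.min? e (fun q => q.2) with
      | none => exact absurd ((PySem.List.min?_eq_none_iff _ _).mp hmin) hne
      | some m => exact ⟨m, rfl⟩
    have hmm : m ∈ e := PySem.List.min?_mem hm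
    have hmf : pvMf e = m.1 := by simp [pvMf, hm]
    have hget : lrm.getD p "" = m.1 := by
      obtain ⟨pe0, hf, hpe0⟩ : ∃ pe0, idx.items.find? (fun q => q.1 == p) = some pe0 ∧ pe0.2 = e := by
        unfold PySem.Dict.get? at he
        cases hf : idx.items.find? (fun q => q.1 == p) with
        | none => rw [hf] at he; simp at he
        | some pe0 => rw [hf] at he; simp at he; exact ⟨pe0, rfl, he⟩
      have : lrm.get? p = some (pvMf pe0.2) := by
        unfold PySem.Dict.get?
        rw [h1, List.find?_map]
        simp [Function.comp_def, hf]
      rw [hpe0] at this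
      simp [PySem.Dict.getD, this, hmf]
    have hlcp : lrm.contains p = true := by rw [hcc]; exact hc
    have hstepA : pvStepA am a lrm (p, r) =
        if r < m.2 then lrm.insert p a else lrm := by
      simp only [pvStepA, hlcp, if_true, hget, hL]
      rw [show pvLook am m.1 p = m.2 from hLe m hmm]
    have hstepB : pvStepB a idx (p, r) = idx.insert p (e ++ [(a, r)]) := by
      simp only [pvStepB, PySem.Dict.modify, PySem.Dict.getD_of_get?_eq_some _ _ he]
    have hmf2 : pvMf (e ++ [(a, r)]) = if r < m.2 then a else m.1 := by
      simp only [pvMf, pv_min?_append, hm]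
      split_ifs <;> rfl
    rw [hstepA, hstepB]
    refine ⟨?_, ?_, PySem.Dict.nodup_keys_insert _ _ _ h3⟩
    · rw [PySem.Dict.items_insert_of_contains _ _ hc]
      by_cases hr : r < m.2
      · rw [if_pos hr, PySem.Dict.items_insert_of_contains _ _ hlcp, h1,
          List.map_map, List.map_map]
        refine List.map_congr_left ?_
        intro pe _
        by_cases hp : pe.1 = p
        · simp [hp, hmf2, hr]
        · simp [hp]
      · rw [if_neg hr, h1, List.map_map]
        refine List.map_congr_left ?_
        intro pe hpe
        by_cases hp : pe.1 = p
        · have : idx.get? pe.1 = some pe.2 :=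
            PySem.Dict.get?_of_mem_items _ (by obtain ⟨x,y⟩ := pe; exact hpe) h3
          rw [hp] at this
          have he2 : pe.2 = e := by rw [this] at he; exact Option.some.inj he.symm |>.symm
          simp [hp, hmf2, hr, he2, hmf]
        · simp [hp]
    · intro pe hpe
      rw [PySem.Dict.mem_items_insert] at hpe
      rcases hpe with rfl | ⟨hpe, _⟩
      · refine ⟨by simp, ?_⟩
        intro q hq
        rcases List.mem_append.mp hq with hq | hq
        · exact hLe q hq
        · simp at hq; subst hq; exact hL
      · exact h2 pe hpe
  · -- new playlist
    have hc' : idx.contains p = false := by simpa using hc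
    have hlcp : lrm.contains p = false := by rw [hcc]; exact hc'
    have hstepB : pvStepB a idx (p, r) = idx.insert p [(a, r)] := by
      simp only [pvStepB, PySem.Dict.modify, PySem.Dict.getD_of_not_contains _ _ hc',
        List.nil_append]
    have hstepA : pvStepA am a lrm (p, r) = lrm.insert p a := by
      simp only [pvStepA, hlcp, if_false, Bool.false_eq_true,
        PySem.Dict.getD_insert_self, hL]
      simp
    rw [hstepA, hstepB]
    refine ⟨?_, ?_, PySem.Dict.nodup_keys_insert _ _ _ h3⟩
    · rw [PySem.Dict.items_insert_of_not_contains _ _ hc',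
        PySem.Dict.items_insert_of_not_contains _ _ hlcp, h1, List.map_append]
      rfl
    · intro pe hpe
      rw [PySem.Dict.mem_items_insert] at hpe
      rcases hpe with rfl | ⟨hpe, _⟩
      · exact ⟨by simp, by intro q hq; simp at hq; subst hq; exact hL⟩
      · exact h2 pe hpe

theorem pv_inv_inner (am : List (String × List (String × Int))) (a : String)
    (pls : List (String × Int)) (lrm : PySem.Dict String String)
    (idx : PySem.Dict String (List (String × Int)))
    (hL : ∀ pr ∈ pls, pvLook am a pr.1 = pr.2) (h : pvInv am lrm idx) :
    pvInv am (pls.foldl (pvStepA am a) lrm) (pls.foldl (pvStepB a) idx) := by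
  induction pls generalizing lrm idx with
  | nil => exact h
  | cons pr t ih =>
      exact ih _ _ (fun q hq => hL q (List.mem_cons_of_mem _ hq))
        (pv_inv_step am a lrm idx pr (hL pr (List.mem_cons_self)) h)

theorem pv_inv_outer (am l : List (String × List (String × Int)))
    (lrm : PySem.Dict String String) (idx : PySem.Dict String (List (String × Int)))
    (hL : ∀ ap ∈ l, ∀ pr ∈ ap.2, pvLook am ap.1 pr.1 = pr.2) (h : pvInv am lrm idx) :
    pvInv am (l.foldl (fun lrm ap => ap.2.foldl (pvStepA am ap.1) lrm) lrm)
      (l.foldl (fun idx ap => ap.2.foldl (pvStepB ap.1) idx) idx) := by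
  induction l generalizing lrm idx with
  | nil => exact h
  | cons ap t ih =>
      exact ih _ _ (fun q hq => hL q (List.mem_cons_of_mem _ hq))
        (pv_inv_inner am ap.1 ap.2 lrm idx (hL ap (List.mem_cons_self)) h)

theorem pv_look_self (am : List (String × List (String × Int)))
    (hpre : Pre_find_lowest_rank am) :
    ∀ ap ∈ am, ∀ pr ∈ ap.2, pvLook am ap.1 pr.1 = pr.2 := by
  intro ap hap pr hpr
  unfold pvLook
  have h1 : (PySem.Dict.mk am).getD ap.1 [] = ap.2 :=
    PySem.Dict.getD_of_mem_items _ hap (by simpa [PySem.Dict.keys_mk] using hpre.1) []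
  rw [h1]
  exact PySem.Dict.getD_of_mem_items _ hpr
    (by simpa [PySem.Dict.keys_mk] using hpre.2 ap hap) 0

-- ===== VERDICT (by name: the statement is the Claim_ definition above) =====
theorem find_lowest_rank_spec : Claim_equal_find_lowest_rank := by
  intro am _ hpre
  unfold Spec_find_lowest_rank
  have hinv := pv_inv_outer am am PySem.Dict.empty PySem.Dict.empty
    (pv_look_self am hpre) ⟨rfl, by simp [PySem.Dict.empty], by simp [PySem.Dict.empty, PySem.Dict.keys_mk]⟩
  have hA : find_lowest_rank am =
      (am.foldl (fun lrm ap => ap.2.foldl (pvStepA am ap.1) lrm) PySem.Dict.empty).items := rfl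
  have hB : find_lowest_rank_alt am =
      (am.foldl (fun idx ap => ap.2.foldl (pvStepB ap.1) idx) PySem.Dict.empty).items.map
        (fun pe => (pe.1, pvMf pe.2)) := rfl
  rw [hA, hB, hinv.1]
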